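-- pv_equiv track=rewrite | github.com/Hilster00/Estudos_Python | Graficos/Matplotlib/QuantidadePalavrasMusica.py | contagem
-- ===== SOURCE A (Python) =====
-- def contagem(letra):
--     #conta quantidade de vezes que a palavra aparece
--     temp={}
--     anterior=None
--     for i in letra:
--         if i != anterior:
--             temp[i]=1
--             anterior=i
--         else:
--             temp[i]+=1
--     return temp
-- ===== SOURCE B (Python) =====
-- def contagem(letra):
--     # Run-segmentation rewrite: scan with two indices, find each maximal run of
--     # equal consecutive words and store its length (later runs overwrite).
--     temp = {}
--     i = 0
--     n = len(letra)
--     while i < n: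
--         j = i + 1
--         while j < n and letra[j] == letra[i]:
--             j += 1
--         temp[letra[i]] = j - i
--         i = j
--     return temp
-- ===== Notes on version B (the rewrite author's own statement) =====
-- stated objective: alternative
-- what changed: Replaces A's per-element loop with an 'anterior' pointer and dict increments by a two-index run-segmentation scan that finds each maximal run of equal consecutive words and stores its length in one dict write per run.
import Mathlib
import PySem

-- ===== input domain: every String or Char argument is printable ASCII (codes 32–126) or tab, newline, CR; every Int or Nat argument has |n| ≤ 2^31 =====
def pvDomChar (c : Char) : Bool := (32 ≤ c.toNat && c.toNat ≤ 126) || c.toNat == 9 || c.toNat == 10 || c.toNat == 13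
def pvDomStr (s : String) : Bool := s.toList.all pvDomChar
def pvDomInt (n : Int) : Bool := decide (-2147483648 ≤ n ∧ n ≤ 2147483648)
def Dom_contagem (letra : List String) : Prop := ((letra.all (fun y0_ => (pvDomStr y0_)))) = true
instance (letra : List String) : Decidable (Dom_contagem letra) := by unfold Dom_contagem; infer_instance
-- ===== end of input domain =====

-- B replaces A's per-element 'anterior'-pointer loop by a two-index run-segmentation
-- scan (one dict write per maximal run); same cost, different decomposition.

-- ===== PORT A =====
-- state = (temp, anterior); one step of A's 'for i in letra' loop
def contagemStep (st : PySem.Dict String Int × Option String) (i : String) :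
    PySem.Dict String Int × Option String :=
  if some i ≠ st.2 then (st.1.insert i 1, some i)
  else (st.1.modify i 0 (· + 1), st.2)

def contagem (letra : List String) : List (String × Int) :=
  (letra.foldl contagemStep (PySem.Dict.empty, none)).1.items

-- ===== PORT B =====
-- inner 'while j < n and letra[j] == letra[i]' loop: length of the run of x at the
-- front of the remaining list, together with the remainder (the two-index scan on
-- indices i/j is transcribed as recursion on the suffix letra[i:])
def takeRun (x : String) : List String → Nat × List String
  | [] => (0, [])
  | y :: ys => if y = x then ((takeRun x ys).1 + 1, (takeRun x ys).2) else (0, y :: ys)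

theorem takeRun_rest_le (x : String) : ∀ ys : List String, (takeRun x ys).2.length ≤ ys.length := by
  intro ys
  induction ys with
  | nil => simp [takeRun]
  | cons y ys ih =>
    by_cases h : y = x
    · simp [takeRun, h]; omega
    · simp [takeRun, h]

-- outer 'while i < n' loop: one dict write (j - i = 1 + run length) per run
def contagemRuns (d : PySem.Dict String Int) : List String → PySem.Dict String Int
  | [] => d
  | x :: xs => contagemRuns (d.insert x (1 + ((takeRun x xs).1 : Int))) (takeRun x xs).2
  termination_by xs => xs.length
  decreasing_by
    have := takeRun_rest_le x xs
    simp; omega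

def contagem_alt (letra : List String) : List (String × Int) :=
  (contagemRuns PySem.Dict.empty letra).items

-- ===== PRECONDITION & SPEC =====
def Spec_contagem (letra : List String) (out : List (String × Int)) : Prop := out = contagem_alt letra
instance (letra : List String) (out : List (String × Int)) : Decidable (Spec_contagem letra out) := by unfold Spec_contagem; infer_instance

-- ===== CLAIM (what is proved, stated in full; the proofs are below) =====
def Claim_equal_contagem : Prop := ∀ (letra : List String), Dom_contagem letra → Spec_contagem letra (contagem letra)

-- ===== LEMMAS AND PROOFS =====

theorem modify_insert_self (d : PySem.Dict String Int) (x : String) (m : Int) :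
    (d.insert x m).modify x 0 (· + 1) = d.insert x (m + 1) := by
  simp [PySem.Dict.modify, PySem.Dict.insert_insert_self]

-- takeRun decomposes the list into the run and the remainder, whose head differs from x
theorem takeRun_decomp (x : String) : ∀ ys : List String,
    ys = List.replicate (takeRun x ys).1 x ++ (takeRun x ys).2 ∧
    (takeRun x ys).2.head? ≠ some x := by
  intro ys
  induction ys with
  | nil => simp [takeRun]
  | cons y ys ih =>
    by_cases h : y = x
    · subst h
      simp only [takeRun]
      exact ⟨by simpa [List.replicate_succ] using ih.1, ih.2⟩
    · simp [takeRun, h]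

-- A's fold absorbs a run of x into the count at x
theorem foldA_run (x : String) : ∀ (k : Nat) (d : PySem.Dict String Int) (m : Int) (rest : List String),
    List.foldl contagemStep (d.insert x m, some x) (List.replicate k x ++ rest)
      = List.foldl contagemStep (d.insert x (m + k), some x) rest := by
  intro k
  induction k with
  | zero => intro d m rest; simp
  | succ k ih =>
    intro d m rest
    have hstep : contagemStep (d.insert x m, some x) x
        = (d.insert x (m + 1), some x) := by
      simp [contagemStep, modify_insert_self]
    calc List.foldl contagemStep (d.insert x m, some x) (List.replicate (k+1) x ++ rest)
        = List.foldl contagemStep (d.insert x (m + 1), some x) (List.replicate k x ++ rest) := by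
          simp [List.replicate_succ, hstep]
      _ = List.foldl contagemStep (d.insert x (m + 1 + k), some x) rest := ih (d) (m + 1) rest
      _ = List.foldl contagemStep (d.insert x (m + (k + 1 : Nat)), some x) rest := by
          push_cast; ring_nf

-- main invariant: from a state (d.insert x m, some x) whose pending head differs from x,
-- A's fold computes exactly B's run recursion
theorem main_inv : ∀ (n : Nat) (xs : List String), xs.length ≤ n →
    ∀ (d : PySem.Dict String Int) (x : String) (m : Int), xs.head? ≠ some x →
    (List.foldl contagemStep (d.insert x m, some x) xs).1 = contagemRuns (d.insert x m) xs := by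
  intro n
  induction n with
  | zero =>
    intro xs hlen d x m _
    have : xs = [] := List.length_eq_zero_iff.mp (Nat.le_zero.mp hlen)
    subst this; simp [contagemRuns]
  | succ n ih =>
    intro xs hlen d x m hhead
    cases xs with
    | nil => simp [contagemRuns]
    | cons y ys =>
      have hyx : y ≠ x := by
        intro h; exact hhead (by simp [h])
      have hstep : contagemStep (d.insert x m, some x) y
          = ((d.insert x m).insert y 1, some y) := by
        simp [contagemStep, hyx]
      obtain ⟨hsplit, hrest⟩ := takeRun_decomp y ys
      have hrl := takeRun_rest_le y ys
      have hlen' : (takeRun y ys).2.length ≤ n := by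
        simp at hlen; omega
      calc (List.foldl contagemStep (d.insert x m, some x) (y :: ys)).1
          = (List.foldl contagemStep ((d.insert x m).insert y 1,
              some y) (List.replicate (takeRun y ys).1 y ++ (takeRun y ys).2)).1 := by
            rw [List.foldl_cons, hstep, ← hsplit]
        _ = (List.foldl contagemStep ((d.insert x m).insert y (1 + ((takeRun y ys).1 : Int)),
              some y) (takeRun y ys).2).1 := by rw [foldA_run]
        _ = contagemRuns ((d.insert x m).insert y (1 + ((takeRun y ys).1 : Int)))
              (takeRun y ys).2 := ih _ hlen' (d.insert x m) y _ hrest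
        _ = contagemRuns (d.insert x m) (y :: ys) := by rw [contagemRuns]

-- ===== VERDICT (by name: the statement is the Claim_ definition above) =====
theorem contagem_spec : Claim_equal_contagem := by
  intro letra _
  unfold Spec_contagem contagem contagem_alt
  cases letra with
  | nil => simp [contagemRuns]
  | cons x xs =>
    congr 1
    have hstep : contagemStep (PySem.Dict.empty, none) x
        = (PySem.Dict.empty.insert x 1, some x) := by
      simp [contagemStep]
    obtain ⟨hsplit, hrest⟩ := takeRun_decomp x xs
    calc (List.foldl contagemStep (PySem.Dict.empty, none) (x :: xs)).1
        = (List.foldl contagemStep (PySem.Dict.empty.insert x 1,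
            some x) (List.replicate (takeRun x xs).1 x ++ (takeRun x xs).2)).1 := by
          rw [List.foldl_cons, hstep, ← hsplit]
      _ = (List.foldl contagemStep (PySem.Dict.empty.insert x (1 + ((takeRun x xs).1 : Int)),
            some x) (takeRun x xs).2).1 := by rw [foldA_run]
      _ = contagemRuns (PySem.Dict.empty.insert x (1 + ((takeRun x xs).1 : Int)))
            (takeRun x xs).2 := main_inv _ _ (Nat.le_refl _) PySem.Dict.empty x _ hrest
      _ = contagemRuns PySem.Dict.empty (x :: xs) := by rw [contagemRuns]
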